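-- pv_equiv track=rewrite | github.com/Curtle199/LogSentry | LogSentry_source_only/gui_debug.py | build_timeline_chart_data
-- ===== SOURCE A (Python) =====
-- from collections import Counter
--
-- def build_timeline_chart_data(results):
--     buckets = Counter()
--     for event in results.get("normalized_events", []) or []:
--         timestamp = event.get("timestamp")
--         if timestamp and timestamp != "Unknown":
--             bucket = timestamp[:16]
--             buckets[bucket] += 1
--
--     if not buckets:
--         return []
--
--     sorted_items = sorted(buckets.items())
--     if len(sorted_items) > 12:
--         sorted_items = sorted_items[-12:]
--     return sorted_items
-- ===== SOURCE B (Python) =====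
-- def build_timeline_chart_data(results):
--     # Sort-then-group aggregation instead of Counter hashing; return value only.
--     events = results.get("normalized_events", []) or []
--     prefixes = sorted(t[:16] for e in events
--                       if (t := e.get("timestamp")) and t != "Unknown")
--     agg = []
--     i = 0
--     n = len(prefixes)
--     while i < n:
--         p = prefixes[i]
--         j = i + 1
--         while j < n and prefixes[j] == p:
--             j += 1
--         agg.append((p, j - i))
--         i = j
--     return agg[-12:]
-- ===== Notes on version B (the rewrite author's own statement) =====
-- stated objective: alternative
-- what changed: Replaces the Counter hash-aggregation followed by sorting the (key,count) items with collecting the valid minute prefixes, sorting the plain strings, and counting run lengths in one scan of the sorted list; the conditional [-12:] truncation becomes an unconditional slice.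
import Mathlib
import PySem

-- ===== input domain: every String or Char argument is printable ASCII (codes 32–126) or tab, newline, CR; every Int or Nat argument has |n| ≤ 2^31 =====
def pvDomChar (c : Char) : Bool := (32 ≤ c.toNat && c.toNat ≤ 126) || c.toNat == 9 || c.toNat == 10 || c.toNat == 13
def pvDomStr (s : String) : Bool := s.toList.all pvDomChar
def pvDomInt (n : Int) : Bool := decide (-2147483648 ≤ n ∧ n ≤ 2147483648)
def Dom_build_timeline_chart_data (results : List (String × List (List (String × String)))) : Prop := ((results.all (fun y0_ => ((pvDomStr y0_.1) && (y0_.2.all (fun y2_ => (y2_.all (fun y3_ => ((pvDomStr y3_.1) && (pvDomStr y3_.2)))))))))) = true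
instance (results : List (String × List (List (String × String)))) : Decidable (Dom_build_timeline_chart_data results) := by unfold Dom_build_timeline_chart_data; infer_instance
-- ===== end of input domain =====

-- B replaces the Counter hash-aggregation of A by sort-the-prefixes-then-count-runs (alternative algorithm, same result).


-- ===== PORT A =====
-- one loop iteration of A: look up "timestamp", on a truthy non-"Unknown" value bump buckets[ts[:16]]
def pvBucketStep (d : PySem.Dict String Int) (event : List (String × String)) : PySem.Dict String Int :=
  match PySem.Dict.get? (PySem.Dict.mk event) "timestamp" with
  | none => d
  | some ts => if ts ≠ "" ∧ ts ≠ "Unknown" then d.modify (PySem.Str.slice ts none (some 16)) 0 (· + 1) else d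

def build_timeline_chart_data (results : List (String × List (List (String × String)))) : List (String × Int) :=
  let events0 := PySem.Dict.getD (PySem.Dict.mk results) "normalized_events" []
  let events := if events0 = [] then [] else events0   -- 'or []' (a list is falsy iff empty)
  let buckets := events.foldl pvBucketStep PySem.Dict.empty
  if buckets.items = [] then []
  else
    let sorted_items := PySem.List.sorted2 buckets.items Prod.fst Prod.snd
    if 12 < sorted_items.length then PySem.List.slice sorted_items (some (-12)) none else sorted_items

-- ===== PORT B =====
-- the comprehension filter: the minute prefix of a truthy non-"Unknown" timestamp, if any
def pvPrefix? (event : List (String × String)) : Option String :=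
  match PySem.Dict.get? (PySem.Dict.mk event) "timestamp" with
  | none => none
  | some ts => if ts ≠ "" ∧ ts ≠ "Unknown" then some (PySem.Str.slice ts none (some 16)) else none

-- B's run-counting scan of the sorted prefix list (the while loop advancing j over a run)
def pvGroupRuns : List String → List (String × Int)
  | [] => []
  | x :: xs =>
    (x, 1 + ((xs.takeWhile (· == x)).length : Int)) :: pvGroupRuns (xs.dropWhile (· == x))
  termination_by l => l.length
  decreasing_by simpa using Nat.lt_succ_of_le (List.length_dropWhile_le _ _)

def build_timeline_chart_data_alt (results : List (String × List (List (String × String)))) : List (String × Int) :=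
  let events := PySem.Dict.getD (PySem.Dict.mk results) "normalized_events" []
  let prefixes := PySem.List.sorted (events.filterMap pvPrefix?) (fun s => s)
  let agg := pvGroupRuns prefixes
  PySem.List.slice agg (some (-12)) none

-- ===== PRECONDITION & SPEC =====
def Spec_build_timeline_chart_data (results : List (String × List (List (String × String)))) (out : List (String × Int)) : Prop := out = build_timeline_chart_data_alt results
instance (results : List (String × List (List (String × String)))) (out : List (String × Int)) : Decidable (Spec_build_timeline_chart_data results out) := by unfold Spec_build_timeline_chart_data; infer_instance

-- ===== CLAIM (what is proved, stated in full; the proofs are below) =====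
def Claim_equal_build_timeline_chart_data : Prop := ∀ (results : List (String × List (List (String × String)))), Dom_build_timeline_chart_data results → Spec_build_timeline_chart_data results (build_timeline_chart_data results)

-- ===== LEMMAS AND PROOFS =====

-- one step of A's loop, phrased through the comprehension filter
theorem pvBucketStep_eq (d : PySem.Dict String Int) (e : List (String × String)) :
    pvBucketStep d e = (match pvPrefix? e with
      | none => d
      | some p => d.modify p 0 (· + 1)) := by
  unfold pvBucketStep pvPrefix?
  cases PySem.Dict.get? (PySem.Dict.mk e) "timestamp" with
  | none => rfl
  | some ts => by_cases h : ts ≠ "" ∧ ts ≠ "Unknown" <;> simp [h]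

-- A's filtered counting loop is Counter of the filtered prefixes
theorem foldl_bucketStep (events : List (List (String × String))) (d : PySem.Dict String Int) :
    events.foldl pvBucketStep d
      = (events.filterMap pvPrefix?).foldl (fun d x => d.modify x 0 (· + 1)) d := by
  induction events generalizing d with
  | nil => rfl
  | cons e es ih =>
    rw [List.foldl_cons, List.filterMap_cons, pvBucketStep_eq]
    cases pvPrefix? e <;> simp [ih]

-- keys emitted by the run scan come from the list
theorem fst_mem_of_mem_groupRuns (s : List String) (a : String × Int) (h : a ∈ pvGroupRuns s) :
    a.1 ∈ s := by
  induction s using pvGroupRuns.induct with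
  | case1 => simp [pvGroupRuns] at h
  | case2 x xs ih =>
    rw [pvGroupRuns] at h
    rcases List.mem_cons.mp h with h1 | h1
    · simp [h1]
    · exact List.mem_cons_of_mem _ ((List.dropWhile_sublist _).subset (ih h1))

-- on a ≤-sorted list, everything the scan drops past the head is strictly larger
theorem lt_of_mem_dropWhile_sorted (x y : String) (xs : List String)
    (hp : xs.Pairwise (· ≤ ·)) (hle : ∀ z ∈ xs, x ≤ z)
    (hy : y ∈ xs.dropWhile (· == x)) : x < y := by
  induction xs with
  | nil => simp at hy
  | cons a as ih =>
    rw [List.dropWhile_cons] at hy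
    by_cases hax : (a == x) = true
    · simp only [hax, if_true] at hy
      exact ih hp.tail (fun z hz => hle z (List.mem_cons_of_mem _ hz)) hy
    · simp only [hax] at hy
      have hxa : x < a := lt_of_le_of_ne (hle a List.mem_cons_self) (by
        intro h; exact hax (by simp [h.symm]))
      rcases List.mem_cons.mp hy with h1 | h1
      · exact h1 ▸ hxa
      · exact lt_of_lt_of_le hxa (List.rel_of_pairwise_cons hp h1)

-- membership in the run scan of a ≤-sorted list: key occurs, count is its multiplicity
theorem mem_groupRuns_sorted (s : List String) (hp : s.Pairwise (· ≤ ·)) (k : String) (c : Int) :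
    (k, c) ∈ pvGroupRuns s ↔ k ∈ s ∧ c = (s.count k : Int) := by
  induction s using pvGroupRuns.induct generalizing k c with
  | case1 => simp [pvGroupRuns]
  | case2 x xs ih =>
    have hxlt : ∀ y ∈ xs.dropWhile (· == x), x < y := fun y hy =>
      lt_of_mem_dropWhile_sorted x y xs hp.tail (fun z hz => List.rel_of_pairwise_cons hp hz) hy
    have hp' : (xs.dropWhile (· == x)).Pairwise (· ≤ ·) := hp.tail.sublist (List.dropWhile_sublist _)
    have hsplit : xs.takeWhile (· == x) ++ xs.dropWhile (· == x) = xs := List.takeWhile_append_dropWhile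
    have htw : ∀ y ∈ xs.takeWhile (· == x), y = x := fun y hy => by
      simpa using List.mem_takeWhile_imp hy
    have hcxs : xs.count x = (xs.takeWhile (· == x)).length := by
      conv_lhs => rw [← hsplit]
      rw [List.count_append, List.count_eq_length.2 (fun b hb => (htw b hb).symm),
        List.count_eq_zero.2 (fun hmem => lt_irrefl x (hxlt x hmem))]
      omega
    have hck : ∀ m, m ≠ x → xs.count m = (xs.dropWhile (· == x)).count m := by
      intro m hm
      conv_lhs => rw [← hsplit]
      rw [List.count_append, List.count_eq_zero.2 (fun hmem => hm (htw m hmem)), Nat.zero_add]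
    rw [pvGroupRuns]
    constructor
    · intro h
      rcases List.mem_cons.mp h with h1 | h1
      · injection h1 with hk hc
        subst hk
        refine ⟨List.mem_cons_self, ?_⟩
        rw [List.count_cons_self, hcxs]
        omega
      · obtain ⟨hk, hc⟩ := (ih hp' k c).1 h1
        have hkx : k ≠ x := fun he => lt_irrefl x (he ▸ hxlt k hk)
        refine ⟨List.mem_cons_of_mem _ ((List.dropWhile_sublist _).subset hk), ?_⟩
        have hcc : (x :: xs).count k = (xs.dropWhile (· == x)).count k := by
          rw [← hck k hkx]
          simp [Ne.symm hkx]
        rw [hcc]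
        exact hc
    · rintro ⟨hk, hc⟩
      by_cases hkx : k = x
      · subst hkx
        refine List.mem_cons.mpr (Or.inl ?_)
        rw [List.count_cons_self, hcxs] at hc
        simp only [Prod.mk.injEq, true_and]
        omega
      · have hk' : k ∈ xs := List.mem_cons.mp hk |>.resolve_left hkx
        have hkd : k ∈ xs.dropWhile (· == x) := by
          rcases (List.mem_append.mp (hsplit ▸ hk')) with h2 | h2
          · exact absurd (htw k h2) hkx
          · exact h2
        refine List.mem_cons.mpr (Or.inr ((ih hp' k c).2 ⟨hkd, ?_⟩))
        have hcc : (x :: xs).count k = (xs.dropWhile (· == x)).count k := by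
          rw [← hck k hkx]
          simp [Ne.symm hkx]
        rw [hcc] at hc
        exact hc

-- the run scan of a ≤-sorted list has strictly increasing keys
theorem pairwise_groupRuns_sorted (s : List String) (hp : s.Pairwise (· ≤ ·)) :
    (pvGroupRuns s).Pairwise (fun a b => a.1 < b.1) := by
  induction s using pvGroupRuns.induct with
  | case1 => simp [pvGroupRuns]
  | case2 x xs ih =>
    rw [pvGroupRuns]
    refine List.Pairwise.cons ?_ (ih (hp.tail.sublist (List.dropWhile_sublist _)))
    intro b hb
    exact lt_of_mem_dropWhile_sorted x b.1 xs hp.tail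
      (fun z hz => List.rel_of_pairwise_cons hp hz)
      (fst_mem_of_mem_groupRuns _ b hb)

-- insertBy is determined by the comparator's values on the inserted element vs the list
theorem insertBy_congr {α : Type} (b₁ b₂ : α → α → Bool) (x : α) (ys : List α)
    (h : ∀ y ∈ ys, b₁ x y = b₂ x y) : PySem.List.insertBy b₁ x ys = PySem.List.insertBy b₂ x ys := by
  induction ys with
  | nil => rfl
  | cons y ys ih =>
    simp only [PySem.List.insertBy]
    rw [h y List.mem_cons_self, ih (fun z hz => h z (List.mem_cons_of_mem _ hz))]

-- insertion sorts with comparators agreeing on the list's pairs coincide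
theorem foldl_insertBy_congr {α : Type} (b₁ b₂ : α → α → Bool) (xs : List α) (acc : List α)
    (h : ∀ x ∈ xs, ∀ y, (y ∈ acc ∨ y ∈ xs) → b₁ x y = b₂ x y) :
    xs.foldl (fun acc x => PySem.List.insertBy b₁ x acc) acc
      = xs.foldl (fun acc x => PySem.List.insertBy b₂ x acc) acc := by
  induction xs generalizing acc with
  | nil => rfl
  | cons x xs ih =>
    rw [List.foldl_cons, List.foldl_cons,
      insertBy_congr b₁ b₂ x acc (fun y hy => h x List.mem_cons_self y (Or.inl hy))]
    refine ih _ (fun z hz y hy => h z (List.mem_cons_of_mem _ hz) y ?_)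
    rcases hy with hy | hy
    · rcases (PySem.List.mem_insertBy _ _ _ _).1 hy with h1 | h1
      · exact Or.inr (h1 ▸ List.mem_cons_self)
      · exact Or.inl h1
    · exact Or.inr (List.mem_cons_of_mem _ hy)

-- when the primary key separates the elements, the tuple sort is the primary-key sort
theorem sorted2_eq_sorted_of_fst_sep (xs : List (String × Int))
    (hinj : ∀ a ∈ xs, ∀ b ∈ xs, a.1 = b.1 → a = b) :
    PySem.List.sorted2 xs Prod.fst Prod.snd = PySem.List.sorted xs Prod.fst := by
  have h2 : PySem.List.sorted2 xs Prod.fst Prod.snd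
      = xs.foldl (fun acc x => PySem.List.insertBy
          (fun a b => decide (a.1 < b.1) || (!decide (b.1 < a.1) && decide (a.2 < b.2))) x acc) [] := rfl
  rw [h2, PySem.List.sorted_eq_foldl_insertBy]
  refine foldl_insertBy_congr _ _ xs [] (fun x hx y hy => ?_)
  have hy' : y ∈ xs := by
    rcases hy with hy | hy
    · simp at hy
    · exact hy
  rcases lt_trichotomy x.1 y.1 with hlt | heq | hgt
  · simp [hlt]
  · have hxy : x = y := hinj x hx y hy' heq
    subst hxy
    simp
  · simp [not_lt_of_gt hgt, hgt]

-- main equivalence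
theorem main_eq (results : List (String × List (List (String × String)))) :
    build_timeline_chart_data results = build_timeline_chart_data_alt results := by
  simp only [build_timeline_chart_data, build_timeline_chart_data_alt]
  have hor : (if PySem.Dict.getD (PySem.Dict.mk results) "normalized_events" [] = [] then []
      else PySem.Dict.getD (PySem.Dict.mk results) "normalized_events" [])
      = PySem.Dict.getD (PySem.Dict.mk results) "normalized_events" [] := by
    split <;> simp_all
  rw [hor]
  set E := PySem.Dict.getD (PySem.Dict.mk results) "normalized_events" [] with hE
  set ps := E.filterMap pvPrefix? with hps
  have hbuck : E.foldl pvBucketStep PySem.Dict.empty = PySem.Dict.counter ps := by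
    rw [foldl_bucketStep, ← PySem.Dict.counter_eq_foldl]
  rw [hbuck, PySem.Dict.items_counter]
  set t := PySem.List.sorted ps (fun s => s) with ht
  have hpt : t.Pairwise (· ≤ ·) := PySem.List.sorted_pairwise ps (fun s => s)
  by_cases hempty : ps = []
  · have ht0 : t = [] := by rw [ht, hempty]; rfl
    rw [hempty, ht0, show pvGroupRuns [] = [] from by rw [pvGroupRuns]]
    decide
  · -- the aggregated, key-sorted lists coincide
    set G := pvGroupRuns t with hG
    have hmemG : ∀ (k : String) (c : Int), (k, c) ∈ G ↔ k ∈ ps ∧ c = (ps.count k : Int) := by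
      intro k c
      rw [hG, mem_groupRuns_sorted t hpt k c, PySem.List.mem_sorted,
        ((PySem.List.sorted_perm ps (fun s => s) false).count_eq k :
          t.count k = ps.count k)]
    set items := (PySem.Set.ofList ps).map (fun k => (k, (ps.count k : Int))) with hitems
    have hmemI : ∀ (a : String × Int), a ∈ items ↔ a.1 ∈ ps ∧ a.2 = (ps.count a.1 : Int) := by
      intro a
      rw [hitems]
      constructor
      · intro ha
        obtain ⟨m, hm, hma⟩ := List.mem_map.mp ha
        have h1 : a.1 = m := by rw [← hma]
        have h2 : a.2 = (ps.count m : Int) := by rw [← hma]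
        exact ⟨h1 ▸ ((PySem.Set.mem_ofList ps m).1 hm), h1 ▸ h2⟩
      · rintro ⟨h1, h2⟩
        exact List.mem_map.mpr ⟨a.1, (PySem.Set.mem_ofList ps a.1).2 h1,
          by rw [← h2]⟩
    have hGP : G.Pairwise (fun a b => a.1 < b.1) := pairwise_groupRuns_sorted t hpt
    have hGnd : G.Nodup := hGP.imp (fun {a b} h => by
      intro he; rw [he] at h; exact lt_irrefl _ h)
    have hInd : items.Nodup := by
      rw [hitems]
      exact (PySem.Set.nodup_ofList ps).map
        (fun a b hab => by injection hab)
    have hperm : G.Perm items := by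
      rw [List.perm_ext_iff_of_nodup hGnd hInd]
      intro a
      rw [hmemI a, ← hmemG a.1 a.2]
    have hinj : ∀ a ∈ items, ∀ b ∈ items, a.1 = b.1 → a = b := by
      intro a ha b hb hab
      obtain ⟨h1, h2⟩ := (hmemI a).1 ha
      obtain ⟨h3, h4⟩ := (hmemI b).1 hb
      exact Prod.ext hab (by rw [h2, h4, hab])
    have hsorted : PySem.List.sorted2 items Prod.fst Prod.snd = G := by
      rw [sorted2_eq_sorted_of_fst_sep items hinj]
      exact PySem.List.sorted_eq_of_perm_of_pairwise_lt items G Prod.fst hperm hGP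
    have hIne : items ≠ [] := by
      obtain ⟨p, hp⟩ := List.exists_mem_of_ne_nil ps hempty
      intro h0
      exact (List.ne_nil_of_mem ((hmemI (p, (ps.count p : Int))).2 ⟨hp, rfl⟩)) h0
    rw [if_neg hIne, hsorted]
    have hslice : PySem.List.slice G (some (-12)) none = G.drop (G.length - 12) :=
      PySem.List.slice_from_neg_ofNat G 12 (by omega)
    by_cases hlen : 12 < G.length
    · rw [if_pos hlen]
    · rw [if_neg hlen, hslice]
      have h12 : G.length - 12 = 0 := by omega
      rw [h12, List.drop_zero]

-- ===== VERDICT (by name: the statement is the Claim_ definition above) =====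
theorem build_timeline_chart_data_spec : Claim_equal_build_timeline_chart_data := by
  intro results _
  exact main_eq results
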